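-- pv_equiv track=rewrite | github.com/duzenz/run-length-encoding | RLE.py | _get_8bit_map
-- ===== SOURCE A (Python) =====
-- def _get_8bit_map(encoded_image):
--     image_map = ""
--     new_encoded_image = list(encoded_image)
--
--     temp = range(0, len(new_encoded_image), 9)
--
--     for i in temp:
--         image_map += '{0:08b}'.format(new_encoded_image[i])
--
--     for i in sorted(list(temp), reverse=True):
--         del new_encoded_image[i]
--
--     return image_map, new_encoded_image
-- ===== SOURCE B (Python) =====
-- def _get_8bit_map(encoded_image):
--     bitmap_parts = []
--     rest = []
--     pos = 0
--     n = len(encoded_image)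
--     while pos < n:
--         bitmap_parts.append('{0:08b}'.format(encoded_image[pos]))
--         rest.extend(encoded_image[pos + 1:pos + 9])
--         pos += 9
--     return ''.join(bitmap_parts), rest
-- ===== Notes on version B (the rewrite author's own statement) =====
-- stated objective: faster
-- what changed: One forward pass over 9-element chunks builds the bitmap and the remainder list together, instead of indexing a range twice and repeatedly deleting every 9th element in place.
import Mathlib
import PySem

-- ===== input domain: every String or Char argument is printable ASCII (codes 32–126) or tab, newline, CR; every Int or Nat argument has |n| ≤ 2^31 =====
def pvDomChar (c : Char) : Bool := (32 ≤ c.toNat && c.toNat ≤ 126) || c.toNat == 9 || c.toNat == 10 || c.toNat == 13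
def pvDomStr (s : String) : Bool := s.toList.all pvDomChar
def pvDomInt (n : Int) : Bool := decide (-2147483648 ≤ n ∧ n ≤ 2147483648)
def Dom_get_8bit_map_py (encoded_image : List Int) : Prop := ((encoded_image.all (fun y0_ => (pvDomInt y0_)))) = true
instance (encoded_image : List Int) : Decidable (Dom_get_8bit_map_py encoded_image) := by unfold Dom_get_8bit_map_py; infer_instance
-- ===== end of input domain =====

-- B replaces A's range-indexing pass plus repeated in-place deletions (O(n^2)) by one forward
-- pass over 9-element chunks building bitmap and remainder together (O(n)); same return value.

-- shared helper: Python "'{0:08b}'.format(n)" — binary digits of |n|, sign-aware zero padding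
-- to total width 8 ('-' counts towards the width; longer representations are not truncated).
def fmtChars_get8 (n : Int) : List Char :=
  let ds := Nat.toDigits 2 n.natAbs
  if n < 0 then '-' :: (List.replicate (7 - ds.length) '0' ++ ds)
  else List.replicate (8 - ds.length) '0' ++ ds

-- ===== PORT A =====
def get_8bit_map_py (encoded_image : List Int) : String × List Int :=
  -- new_encoded_image = list(encoded_image)
  let new_encoded_image := encoded_image
  -- temp = range(0, len(new_encoded_image), 9)
  let temp := PySem.List.pyRange 0 (new_encoded_image.length : Int) 9
  -- for i in temp: image_map += '{0:08b}'.format(new_encoded_image[i])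
  -- (every i of temp is in range, so new_encoded_image[i] never raises; pyGetD is exact here)
  let image_map :=
    temp.foldl (fun s i => s ++ fmtChars_get8 (PySem.List.pyGetD new_encoded_image i 0)) ([] : List Char)
  -- for i in sorted(list(temp), reverse=True): del new_encoded_image[i]
  -- (each index is nonnegative and in range at deletion time, so 'del' is exactly eraseIdx)
  let result :=
    (PySem.List.sorted temp (fun x => x) true).foldl (fun l i => l.eraseIdx i.toNat) new_encoded_image
  (String.mk image_map, result)

-- ===== PORT B =====
-- the while loop of Source B: each iteration reads encoded_image[pos] (the chunk head), appends
-- encoded_image[pos+1:pos+9] to rest and steps pos += 9 — i.e. structural recursion on the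
-- suffix starting at pos: head x gives a bitmap part, take 8 of the tail goes to rest.
def get8Go : List Int → List Char × List Int
  | [] => ([], [])
  | x :: xs =>
    let r := get8Go (xs.drop 8)
    (fmtChars_get8 x ++ r.1, xs.take 8 ++ r.2)
termination_by l => l.length
decreasing_by simp [List.length_drop]

def get_8bit_map_py_alt (encoded_image : List Int) : String × List Int :=
  let r := get8Go encoded_image
  (String.mk r.1, r.2)

-- ===== PRECONDITION & SPEC =====
def Spec_get_8bit_map_py (encoded_image : List Int) (out : String × List Int) : Prop := out = get_8bit_map_py_alt encoded_image
instance (encoded_image : List Int) (out : String × List Int) : Decidable (Spec_get_8bit_map_py encoded_image out) := by unfold Spec_get_8bit_map_py; infer_instance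

-- ===== CLAIM (what is proved, stated in full; the proofs are below) =====
def Claim_equal_get_8bit_map_py : Prop := ∀ (encoded_image : List Int), Dom_get_8bit_map_py encoded_image → Spec_get_8bit_map_py encoded_image (get_8bit_map_py encoded_image)

-- ===== LEMMAS AND PROOFS =====

lemma pyRange9_eq_nil (b : Int) (h : b ≤ 0) : PySem.List.pyRange 0 b 9 = [] := by
  rw [PySem.List.pyRange_of_pos 0 b (by norm_num), if_neg (by omega)]
  simp

lemma pyRange9_cons (n : Nat) (h : 0 < n) :
    PySem.List.pyRange 0 (n : Int) 9 =
      0 :: (PySem.List.pyRange 0 ((n : Int) - 9) 9).map (· + 9) := by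
  rw [PySem.List.pyRange_of_pos 0 (n : Int) (by norm_num),
      PySem.List.pyRange_of_pos 0 ((n : Int) - 9) (by norm_num)]
  rw [if_pos (by exact_mod_cast h)]
  by_cases h9 : (n : Int) - 9 ≤ 0
  · rw [if_neg (by omega)]
    have h1 : (((n : Int) - 0 + 9 - 1) / 9).toNat = 1 := by omega
    rw [h1]
    simp
  · rw [if_pos (by omega)]
    have h1 : (((n : Int) - 0 + 9 - 1) / 9) = (((n : Int) - 9 - 0 + 9 - 1) / 9) + 1 := by omega
    have h2 : (((n : Int) - 0 + 9 - 1) / 9).toNat = (((n : Int) - 9 - 0 + 9 - 1) / 9).toNat + 1 := by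
      omega
    rw [h2, List.range_succ_eq_map]
    simp only [List.map_cons, List.map_map]
    congr 1

lemma mem_pyRange9_nonneg {b i : Int} (h : i ∈ PySem.List.pyRange 0 b 9) : 0 ≤ i := by
  rw [PySem.List.mem_pyRange_iff_of_pos (by norm_num)] at h
  exact h.1

lemma pairwise_lt_pyRange9 (b : Int) : (PySem.List.pyRange 0 b 9).Pairwise (· < ·) := by
  rw [PySem.List.pyRange_of_pos 0 b (by norm_num)]
  rw [List.pairwise_map]
  exact List.pairwise_lt_range.imp (by intro a b hab; omega)

-- the bound of the recursive call's range equals the A-side bound shifted by 9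
lemma pyRange9_drop_bound (xs : List Int) :
    PySem.List.pyRange 0 (((xs.drop 8).length : Int)) 9 =
      PySem.List.pyRange 0 ((xs.length : Int) + 1 - 9) 9 := by
  by_cases hle : 8 ≤ xs.length
  · congr 1
    simp [List.length_drop]
    omega
  · rw [pyRange9_eq_nil _ (by simp [List.length_drop]; omega),
        pyRange9_eq_nil _ (by omega)]

-- A's bitmap loop (as a flatMap over the range) computes B's first component
lemma bitmap_eq (e : List Int) :
    (PySem.List.pyRange 0 (e.length : Int) 9).flatMap
        (fun i => fmtChars_get8 (PySem.List.pyGetD e i 0)) = (get8Go e).1 := by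
  induction e using get8Go.induct with
  | case1 =>
    simp only [List.length_nil, Nat.cast_zero]
    rw [pyRange9_eq_nil 0 le_rfl]
    simp [get8Go]
  | case2 x xs ih =>
    have hcons : ((x :: xs : List Int).length : Int) = ((xs.length + 1 : Nat) : Int) := by simp
    rw [hcons, pyRange9_cons (xs.length + 1) (Nat.succ_pos _)]
    rw [List.flatMap_cons]
    have h0 : PySem.List.pyGetD (x :: xs) 0 0 = x := by
      rw [PySem.List.pyGetD_of_nonneg _ _ le_rfl]; rfl
    rw [h0]
    have hmap : ((PySem.List.pyRange 0 (((xs.length + 1 : Nat) : Int) - 9) 9).map (· + 9)).flatMap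
          (fun i => fmtChars_get8 (PySem.List.pyGetD (x :: xs) i 0)) =
        (PySem.List.pyRange 0 (((xs.drop 8).length : Int)) 9).flatMap
          (fun i => fmtChars_get8 (PySem.List.pyGetD (xs.drop 8) i 0)) := by
      have hb : (((xs.length + 1 : Nat)) : Int) - 9 = (xs.length : Int) + 1 - 9 := by push_cast; ring
      rw [hb, ← pyRange9_drop_bound xs]
      rw [List.flatMap_map]
      simp only [List.flatMap_def]
      congr 1
      apply List.map_congr_left
      intro i hi
      have hi0 : 0 ≤ i := mem_pyRange9_nonneg hi
      have hg : PySem.List.pyGetD (x :: xs) (i + 9) 0 = PySem.List.pyGetD (xs.drop 8) i 0 := by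
        rw [PySem.List.pyGetD_of_nonneg _ _ (by omega), PySem.List.pyGetD_of_nonneg _ _ hi0]
        have ht : (i + 9).toNat = 8 + i.toNat + 1 := by omega
        simp [List.getD_eq_getElem?_getD, ht, List.getElem?_drop]
      simp [hg]
    rw [hmap, ih]
    simp [get8Go]

-- deleting shifted indices leaves a length-9 prefix untouched
lemma foldr_erase_shift (t : List Int) (p rest : List Int) (hp : p.length = 9)
    (ht : ∀ i ∈ t, (0 : Int) ≤ i) :
    List.foldr (fun i l => l.eraseIdx (i + 9).toNat) (p ++ rest) t =
      p ++ List.foldr (fun i l => l.eraseIdx i.toNat) rest t := by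
  induction t with
  | nil => rfl
  | cons i t iht =>
    simp only [List.foldr_cons]
    rw [iht (fun j hj => ht j (List.mem_cons_of_mem _ hj))]
    have hi : (0 : Int) ≤ i := ht i List.mem_cons_self
    rw [List.eraseIdx_append_of_length_le (by omega)]
    congr 1
    congr 1
    omega

-- A's deletion loop (as a foldr over the ascending range) computes B's second component
lemma rest_eq (e : List Int) :
    List.foldr (fun i l => l.eraseIdx i.toNat) e (PySem.List.pyRange 0 (e.length : Int) 9) =
      (get8Go e).2 := by
  induction e using get8Go.induct with
  | case1 =>
    simp only [List.length_nil, Nat.cast_zero]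
    rw [pyRange9_eq_nil 0 le_rfl]
    simp [get8Go]
  | case2 x xs ih =>
    have hcons : ((x :: xs : List Int).length : Int) = ((xs.length + 1 : Nat) : Int) := by simp
    rw [hcons, pyRange9_cons (xs.length + 1) (Nat.succ_pos _)]
    rw [List.foldr_cons]
    have hmap : List.foldr (fun i l => l.eraseIdx i.toNat) (x :: xs)
          ((PySem.List.pyRange 0 (((xs.length + 1 : Nat) : Int) - 9) 9).map (· + 9)) =
        x :: (xs.take 8 ++ (get8Go (xs.drop 8)).2) := by
      rw [List.foldr_map]
      by_cases hle : 8 ≤ xs.length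
      · have hsplit : x :: xs = (x :: xs.take 8) ++ xs.drop 8 := by
          simp [List.take_append_drop]
        rw [hsplit, foldr_erase_shift _ _ _ (by simp; omega)
              (fun i hi => mem_pyRange9_nonneg hi)]
        have hb : (((xs.length + 1 : Nat)) : Int) - 9 = (xs.length : Int) + 1 - 9 := by
          push_cast; ring
        rw [hb, ← pyRange9_drop_bound xs, ih]
        simp
      · rw [pyRange9_eq_nil _ (by push_cast; omega)]
        have hd : xs.drop 8 = [] := List.drop_eq_nil_of_le (by omega)
        rw [hd]
        simp [get8Go, List.take_of_length_le (by omega : xs.length ≤ 8)]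
    rw [hmap]
    simp [get8Go]

-- sorted(temp, reverse=True) is temp reversed (temp is strictly increasing)
lemma sorted_rev_pyRange9 (b : Int) :
    PySem.List.sorted (PySem.List.pyRange 0 b 9) (fun x => x) true =
      (PySem.List.pyRange 0 b 9).reverse := by
  apply PySem.List.sorted_rev_eq_of_perm_of_pairwise_gt
  · exact (PySem.List.pyRange 0 b 9).reverse_perm
  · rw [List.pairwise_reverse]
    exact pairwise_lt_pyRange9 b

-- ===== VERDICT (by name: the statement is the Claim_ definition above) =====
theorem get_8bit_map_py_spec : Claim_equal_get_8bit_map_py := by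
  intro e _
  unfold Spec_get_8bit_map_py get_8bit_map_py get_8bit_map_py_alt
  simp only
  rw [Prod.mk.injEq]
  constructor
  · rw [PySem.List.foldl_append_eq_flatMap, List.nil_append, bitmap_eq]
  · rw [sorted_rev_pyRange9, List.foldl_reverse, rest_eq]
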